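-- pv_equiv track=rewrite | github.com/yugeshcheemakurthi/secondyearcp | 03-nth_pronicnumber-Python/nthpronicnumber.py | nthpronicnumber
-- ===== SOURCE A (Python) =====
-- import math
--
-- def checkpronic (x) :
--
--     i = 0
--     while ( i <= (int)(math.sqrt(x)) ) :
--
--
--         if ( x == i * (i + 1)) :
--             return True
--         i = i + 1
--
--     return False
--
-- def nthpronicnumber(n):
--     count=0
--     j=0
--     while(count<=n):
--         if(checkpronic(j)):
--             count+=1
--             res=j
--         j+=1
--     return res
-- ===== SOURCE B (Python) =====
-- def nthpronicnumber(n):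
--     count = 0
--     i = 0
--     while count <= n:
--         res = i * (i + 1)
--         count += 1
--         i += 1
--     return res
-- ===== Notes on version B (the rewrite author's own statement) =====
-- stated objective: faster
-- what changed: B generates pronic numbers directly as i*(i+1) with a single counter loop, eliminating A's per-integer primality-style test (checkpronic) that scans every integer j and runs an inner loop up to sqrt(j).
import Mathlib
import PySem

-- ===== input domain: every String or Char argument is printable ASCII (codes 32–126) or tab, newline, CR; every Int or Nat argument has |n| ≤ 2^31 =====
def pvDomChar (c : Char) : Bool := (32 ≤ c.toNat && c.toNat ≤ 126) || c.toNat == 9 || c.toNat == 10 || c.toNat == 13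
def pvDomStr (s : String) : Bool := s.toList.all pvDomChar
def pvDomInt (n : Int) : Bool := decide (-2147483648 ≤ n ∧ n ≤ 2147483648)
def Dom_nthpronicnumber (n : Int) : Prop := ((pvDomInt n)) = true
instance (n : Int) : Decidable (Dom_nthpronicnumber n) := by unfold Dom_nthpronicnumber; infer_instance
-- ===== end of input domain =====

-- B replaces A's scan-every-integer-and-test loop by directly generating the pronic numbers i*(i+1): asymptotically faster.

-- ===== PORT A =====
-- checkpronic's inner while loop: i runs from 0 while i <= int(math.sqrt(x)).
-- int(math.sqrt x) is ported as Nat.sqrt of x.toNat: exact for the boolean outcome on this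
-- domain (x ≥ 0 here; float sqrt of x ≤ 2^62 errs by far less than 1/2, and a pronic x = k(k+1)
-- has true sqrt k + ~0.5, so the truncated float sqrt reaches k exactly when Nat.sqrt does).
def cpAux (x : Int) (i : Nat) : Bool :=
  if h : (i : Int) ≤ ((Int.toNat x).sqrt : Int) then
    if x = (i : Int) * ((i : Int) + 1) then true
    else cpAux x (i + 1)
  else false
termination_by (Int.toNat x).sqrt + 1 - i
decreasing_by
  have : i ≤ (Int.toNat x).sqrt := by exact_mod_cast h
  omega

def checkpronic (x : Int) : Bool := cpAux x 0

-- the while(count<=n) loop of A; fuel is only a termination guard (chosen = the exact number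
-- of iterations for n ≥ 0), res is Option since Python's res starts unbound.
def loopA (n : Int) : Nat → Int → Int → Option Int → Option Int
  | 0, _, _, res => res
  | f + 1, count, j, res =>
    if count ≤ n then
      if checkpronic j then loopA n f (count + 1) (j + 1) (some j)
      else loopA n f count (j + 1) res
    else res

def nthpronicnumber (n : Int) : Int :=
  (loopA n (n.toNat * (n.toNat + 1) + 2) 0 0 none).getD 0

-- ===== PORT B =====
def loopB (n : Int) : Nat → Int → Int → Option Int → Option Int
  | 0, _, _, res => res
  | f + 1, count, i, res =>
    if count ≤ n then loopB n f (count + 1) (i + 1) (some (i * (i + 1)))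
    else res

def nthpronicnumber_alt (n : Int) : Int :=
  (loopB n (n.toNat + 2) 0 0 none).getD 0

-- ===== PRECONDITION & SPEC =====
-- Pre_ excludes negative n, where the Python A's loop body never runs and A raises UnboundLocalError
-- (res unbound); B raises identically there.
def Pre_nthpronicnumber (n : Int) : Prop := 0 ≤ n
instance (n : Int) : Decidable (Pre_nthpronicnumber n) := by unfold Pre_nthpronicnumber; infer_instance
def pvWitness_nthpronicnumber : Int := 3

def Spec_nthpronicnumber (n : Int) (out : Int) : Prop := out = nthpronicnumber_alt n
instance (n : Int) (out : Int) : Decidable (Spec_nthpronicnumber n out) := by unfold Spec_nthpronicnumber; infer_instance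

-- ===== CLAIM (what is proved, stated in full; the proofs are below) =====
def Claim_equal_nthpronicnumber : Prop := ∀ (n : Int), Dom_nthpronicnumber n → Pre_nthpronicnumber n → Spec_nthpronicnumber n (nthpronicnumber n)

-- ===== LEMMAS AND PROOFS =====

-- checkpronic returns true on every pronic number k*(k+1)
theorem cpAux_true (x : Int) (k : Nat) (hx : x = (k : Int) * ((k : Int) + 1)) :
    ∀ i : Nat, i ≤ k → cpAux x i = true := by
  have hsq : k ≤ (Int.toNat x).sqrt := by
    have hx' : Int.toNat x = k * (k + 1) := by
      rw [hx, show (k : Int) * ((k : Int) + 1) = ((k * (k + 1) : Nat) : Int) from by push_cast; ring,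
        Int.toNat_natCast]
    rw [hx', Nat.le_sqrt]
    exact Nat.mul_le_mul_left k (Nat.le_succ k)
  intro i hi
  induction hk : k - i generalizing i with
  | zero =>
    have : i = k := by omega
    subst this
    rw [cpAux, dif_pos (show (i : Int) ≤ ((Int.toNat x).sqrt : Int) from by exact_mod_cast hsq),
      if_pos hx]
  | succ m ih =>
    rw [cpAux]
    have hle : (i : Int) ≤ ((Int.toNat x).sqrt : Int) := by
      have : i ≤ (Int.toNat x).sqrt := le_trans hi hsq
      exact_mod_cast this
    by_cases he : x = (i : Int) * ((i : Int) + 1)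
    · rw [dif_pos hle, if_pos he]
    · rw [dif_pos hle, if_neg he]
      exact ih (i + 1) (by omega) (by omega)

-- checkpronic returns false when x is not pronic
theorem cpAux_false (x : Int) (hnp : ∀ k : Nat, x ≠ (k : Int) * ((k : Int) + 1)) :
    ∀ i : Nat, cpAux x i = false := by
  intro i
  induction hm : (Int.toNat x).sqrt + 1 - i generalizing i with
  | zero =>
    rw [cpAux]
    have : ¬ ((i : Int) ≤ ((Int.toNat x).sqrt : Int)) := by
      have : (Int.toNat x).sqrt < i := by omega
      omega
    simp [this]
  | succ m ih =>
    rw [cpAux]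
    by_cases hle : (i : Int) ≤ ((Int.toNat x).sqrt : Int)
    · simp only [hle, dif_pos, hnp i, if_neg, not_false_iff]
      have : i ≤ (Int.toNat x).sqrt := by exact_mod_cast hle
      exact ih (i + 1) (by omega)
    · simp [hle]

-- strict monotonicity of k ↦ k(k+1) over Nat, cast form
theorem pronic_gap (c : Nat) (t : Int)
    (h1 : (c : Int) * ((c : Int) + 1) < t) (h2 : t < ((c : Int) + 1) * ((c : Int) + 2)) :
    ∀ k : Nat, t ≠ (k : Int) * ((k : Int) + 1) := by
  intro k ht
  subst ht
  by_cases hk : k ≤ c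
  · have : (k : Int) * ((k : Int) + 1) ≤ (c : Int) * ((c : Int) + 1) := by
      have hkc : (k : Int) ≤ (c : Int) := by exact_mod_cast hk
      nlinarith [Int.natCast_nonneg k, Int.natCast_nonneg c]
    omega
  · have hkc : (c : Int) + 1 ≤ (k : Int) := by
      have : c + 1 ≤ k := by omega
      exact_mod_cast this
    have : ((c : Int) + 1) * ((c : Int) + 2) ≤ (k : Int) * ((k : Int) + 1) := by
      nlinarith [Int.natCast_nonneg c]
    omega

-- stepping loopA across a stretch of m consecutive non-pronic values of j
theorem loopA_stretch (n : Int) (m : Nat) :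
    ∀ (f : Nat) (c j : Int) (res : Option Int), c ≤ n →
      (∀ t : Int, j ≤ t → t < j + m → ∀ k : Nat, t ≠ (k : Int) * ((k : Int) + 1)) →
      loopA n (m + f) c j res = loopA n f c (j + m) res := by
  induction m with
  | zero => intro f c j res _ _; simp
  | succ m ih =>
    intro f c j res hc hnp
    have hstep : m + 1 + f = (m + f) + 1 := by omega
    rw [hstep, loopA]
    have hcp : checkpronic j = false := by
      apply cpAux_false
      intro k
      exact hnp j le_rfl (by push_cast; omega) k
    simp only [hc, if_pos, hcp, Bool.false_eq_true, if_neg, not_false_iff]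
    have := ih f c (j + 1) res hc (by
      intro t ht1 ht2 k
      exact hnp t (by omega) (by push_cast at ht2 ⊢; omega) k)
    rw [this]
    congr 1
    push_cast
    ring

-- main invariant for A's loop: from state (count = c, j = c(c+1)) with exactly the right fuel,
-- the loop returns the n-th pronic number
theorem loopA_run (n : Int) (hn : 0 ≤ n) :
    ∀ (k c : Nat) (res : Option Int), (c : Int) + (k : Int) = n →
      loopA n (n.toNat * (n.toNat + 1) - c * (c + 1) + 2) (c : Int)
        ((c : Int) * ((c : Int) + 1)) res
      = some ((n : Int) * (n + 1)) := by
  intro k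
  induction k with
  | zero =>
    intro c res hc
    simp only [Nat.cast_zero, add_zero] at hc
    have hcn : c = n.toNat := by omega
    subst hcn
    rw [show Int.toNat n * (Int.toNat n + 1) - Int.toNat n * (Int.toNat n + 1) + 2 = 2 by omega]
    rw [loopA]
    have hcp : checkpronic ((Int.toNat n : Int) * ((Int.toNat n : Int) + 1)) = true :=
      cpAux_true _ (Int.toNat n) rfl 0 (Nat.zero_le _)
    rw [if_pos (le_of_eq hc), if_pos hcp, loopA,
      if_neg (show ¬ ((Int.toNat n : Int) + 1 ≤ n) from by omega), hc]
  | succ k ih =>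
    intro c res hc
    have hcast : (c : Int) + ((k : Nat) + 1 : Nat) = n := hc
    have hclt : (c : Int) < n := by push_cast at hcast; omega
    have hcN : c + (k + 1) = n.toNat := by
      have := hc; push_cast at this; omega
    -- abbreviations for the three products
    have hprod1 : (c + 1) * (c + 2) = c * (c + 1) + (2 * c + 2) := by ring
    have hprod2 : (c + 1) * (c + 2) ≤ n.toNat * (n.toNat + 1) := by
      apply Nat.mul_le_mul <;> omega
    have hfuel : n.toNat * (n.toNat + 1) - c * (c + 1) + 2
        = ((2 * c + 1) + (n.toNat * (n.toNat + 1) - (c + 1) * (c + 2) + 2)) + 1 := by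
      omega
    rw [hfuel, loopA]
    have hcp : checkpronic ((c : Int) * ((c : Int) + 1)) = true :=
      cpAux_true _ c rfl 0 (Nat.zero_le _)
    simp only [le_of_lt hclt, if_pos, hcp]
    have hc1n : (c : Int) + 1 ≤ n := by omega
    rw [loopA_stretch n (2 * c + 1) _ ((c : Int) + 1) ((c : Int) * ((c : Int) + 1) + 1) _ hc1n
      (by
        intro t ht1 ht2 k'
        apply pronic_gap c t (by omega)
        push_cast at ht2 ⊢
        nlinarith [ht2])]
    have hj : (c : Int) * ((c : Int) + 1) + 1 + ((2 * c + 1 : Nat) : Int)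
        = ((c + 1 : Nat) : Int) * (((c + 1 : Nat) : Int) + 1) := by
      push_cast; ring
    rw [hj]
    have := ih (c + 1) (some ((c : Int) * ((c : Int) + 1))) (by push_cast at hc ⊢; omega)
    exact this

-- B's loop returns the n-th pronic number
theorem loopB_run (n : Int) (hn : 0 ≤ n) :
    ∀ (k : Nat) (c : Int) (res : Option Int), 0 ≤ c → c + (k : Int) = n →
      loopB n (k + 2) c c res = some (n * (n + 1)) := by
  intro k
  induction k with
  | zero =>
    intro c res hc0 hc
    simp only [Nat.cast_zero, add_zero] at hc
    subst hc
    rw [loopB]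
    simp only [le_refl, if_pos]
    rw [loopB]
    simp [show ¬ (c + 1 ≤ c) by omega]
  | succ k ih =>
    intro c res hc0 hc
    have hcn : c ≤ n := by push_cast at hc; omega
    have : k + 1 + 2 = (k + 2) + 1 := by omega
    rw [this, loopB]
    simp only [hcn, if_pos]
    exact ih (c + 1) _ (by omega) (by push_cast at hc ⊢; omega)

-- ===== VERDICT (by name: the statement is the Claim_ definition above) =====
theorem nthpronicnumber_spec : Claim_equal_nthpronicnumber := by
  intro n _ hpre
  unfold Spec_nthpronicnumber nthpronicnumber nthpronicnumber_alt
  have hN : ((n.toNat : Int)) = n := Int.toNat_of_nonneg hpre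
  have hA := loopA_run n hpre n.toNat 0 none (by simp [hN])
  have hB := loopB_run n hpre n.toNat 0 none le_rfl (by simp [hN])
  simp only [Nat.cast_zero, zero_mul, zero_add] at hA hB
  rw [show n.toNat * (n.toNat + 1) - 0 + 2 = n.toNat * (n.toNat + 1) + 2 from by omega] at hA
  rw [hA, hB]
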